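-- pv_equiv track=rewrite | github.com/Cajamarcac/ai_Dolar | app_AI_Dolar.py | combine_duplicate_urls
-- ===== SOURCE A (Python) =====
-- def combine_duplicate_urls(news_titles, news_urls, news_dates):
--     unique_urls = []
--     unique_titles = []
--     unique_dates = []
--
--     for title, url, date in zip(news_titles, news_urls, news_dates):
--         if url not in unique_urls:
--             unique_urls.append(url)
--             unique_titles.append(title)
--             unique_dates.append(date)
--         else:
--             index = unique_urls.index(url)
--             unique_titles[index] += f"\n{title}"
--             unique_dates[index] += f"\n{date}"
--
--     return unique_titles, unique_urls, unique_dates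
-- ===== SOURCE B (Python) =====
-- def combine_duplicate_urls(news_titles, news_urls, news_dates):
--     acc = {}
--     for title, url, date in zip(news_titles, news_urls, news_dates):
--         ts, ds = acc.setdefault(url, ([], []))
--         ts.append(title)
--         ds.append(date)
--     unique_urls = list(acc.keys())
--     unique_titles = ["\n".join(acc[u][0]) for u in unique_urls]
--     unique_dates = ["\n".join(acc[u][1]) for u in unique_urls]
--     return unique_titles, unique_urls, unique_dates
-- ===== Notes on version B (the rewrite author's own statement) =====
-- stated objective: faster
-- what changed: A deduplicates with an unindexed list plus an inner 'url not in' / list.index scan and concatenates merged titles/dates inline; B makes one hash-dict pass accumulating per-url title and date lists and a separate emit pass joining them with newlines.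
import Mathlib
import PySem

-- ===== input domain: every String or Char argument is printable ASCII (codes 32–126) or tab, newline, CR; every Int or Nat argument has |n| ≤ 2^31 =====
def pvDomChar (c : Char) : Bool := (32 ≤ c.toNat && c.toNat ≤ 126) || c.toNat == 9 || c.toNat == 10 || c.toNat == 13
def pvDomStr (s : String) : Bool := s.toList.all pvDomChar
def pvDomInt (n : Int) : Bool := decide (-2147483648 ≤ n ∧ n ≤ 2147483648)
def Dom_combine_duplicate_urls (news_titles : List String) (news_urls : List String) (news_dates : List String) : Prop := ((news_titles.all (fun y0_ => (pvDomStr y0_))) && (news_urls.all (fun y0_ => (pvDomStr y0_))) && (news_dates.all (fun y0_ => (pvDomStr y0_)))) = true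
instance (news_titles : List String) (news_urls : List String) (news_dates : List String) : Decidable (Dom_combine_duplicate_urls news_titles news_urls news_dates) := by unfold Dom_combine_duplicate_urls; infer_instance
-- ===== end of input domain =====

-- B replaces A's inline index-then-concatenate loop by a dict accumulating per-url title/date lists
-- plus a separate join-emit pass, removing the inner list scans (measured faster; same zip truncation and first-appearance order).

-- ===== PORT A =====
-- `lst[i] += "\n" + x` on an in-range index i (A only reaches in-range indices)
def pvBump : List String → Nat → String → List String
  | [], _, _ => []
  | s :: rest, 0, x => (s ++ "\n" ++ x) :: rest
  | s :: rest, Nat.succ i, x => s :: pvBump rest i x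

-- one iteration of A's loop; state is (unique_urls, unique_titles, unique_dates), x is (title, url, date)
def pvStepA (st : List String × List String × List String) (x : String × String × String) :
    List String × List String × List String :=
  let (urls, titles, dates) := st
  let (title, url, date) := x
  if urls.contains url = false then
    (urls ++ [url], titles ++ [title], dates ++ [date])
  else
    match PySem.List.index? urls url with
    | some i => (urls, pvBump titles i title, pvBump dates i date)
    | none => (urls, titles, dates)  -- unreachable: `url in unique_urls` holds here

def combine_duplicate_urls (news_titles : List String) (news_urls : List String) (news_dates : List String) : List String × List String × List String :=
  let st := (List.zip news_titles (List.zip news_urls news_dates)).foldl pvStepA ([], [], [])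
  (st.2.1, st.1, st.2.2)

-- ===== PORT B =====
-- one iteration of B's loop: acc.setdefault(url, ([], [])) then append title/date to the two lists
def pvStepB (d : PySem.Dict String (List String × List String)) (x : String × String × String) :
    PySem.Dict String (List String × List String) :=
  d.modify x.2.1 ([], []) (fun p => (p.1 ++ [x.1], p.2 ++ [x.2.2]))

def combine_duplicate_urls_alt (news_titles : List String) (news_urls : List String) (news_dates : List String) : List String × List String × List String :=
  let acc := (List.zip news_titles (List.zip news_urls news_dates)).foldl pvStepB PySem.Dict.empty
  let unique_urls := acc.keys
  (unique_urls.map (fun u => PySem.Str.join "\n" (acc.getD u ([], [])).1),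
   unique_urls,
   unique_urls.map (fun u => PySem.Str.join "\n" (acc.getD u ([], [])).2))

-- ===== PRECONDITION & SPEC =====
def Spec_combine_duplicate_urls (news_titles : List String) (news_urls : List String) (news_dates : List String) (out : List String × List String × List String) : Prop := out = combine_duplicate_urls_alt news_titles news_urls news_dates
instance (news_titles : List String) (news_urls : List String) (news_dates : List String) (out : List String × List String × List String) : Decidable (Spec_combine_duplicate_urls news_titles news_urls news_dates out) := by unfold Spec_combine_duplicate_urls; infer_instance

-- ===== CLAIM (what is proved, stated in full; the proofs are below) =====
def Claim_equal_combine_duplicate_urls : Prop := ∀ (news_titles : List String) (news_urls : List String) (news_dates : List String), Dom_combine_duplicate_urls news_titles news_urls news_dates → Spec_combine_duplicate_urls news_titles news_urls news_dates (combine_duplicate_urls news_titles news_urls news_dates)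

-- ===== LEMMAS AND PROOFS =====

-- joining a one-element list is the element
theorem pvJoin_singleton (s : String) : PySem.Str.join "\n" [s] = s := by
  simp [PySem.Str.join, PySem.Chars.join, List.intercalate]

theorem pvIntercalate_cons_cons (a b : List Char) (bs : List (List Char)) :
    List.intercalate ['\n'] (a :: b :: bs) = a ++ '\n' :: List.intercalate ['\n'] (b :: bs) := by
  simp [List.intercalate, List.intersperse]

-- joining after appending one more piece tacks on "\n" ++ piece (for a nonempty prefix)
theorem pvJoin_append_singleton (l : List String) (t : String) (h : l ≠ []) :
    PySem.Str.join "\n" (l ++ [t]) = PySem.Str.join "\n" l ++ "\n" ++ t := by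
  have key : ∀ (xs : List (List Char)) (y : List Char), xs ≠ [] →
      List.intercalate ['\n'] (xs ++ [y]) = List.intercalate ['\n'] xs ++ '\n' :: y := by
    intro xs y hxs
    induction xs with
    | nil => simp at hxs
    | cons a as ih =>
      cases as with
      | nil => simp [List.intercalate]
      | cons b bs =>
        have h2 := ih (by simp)
        simp only [List.cons_append] at h2 ⊢
        rw [pvIntercalate_cons_cons, pvIntercalate_cons_cons, h2]
        simp
  rw [← String.toList_inj]
  have h2 : (l.map String.toList) ≠ [] := by simpa using h
  simp [PySem.Str.join, PySem.Chars.join, String.toList_append, String.toList_ofList,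
    key (l.map String.toList) t.toList h2]

-- A's fresh-url branch, stated on an explicit state
theorem pvStepA_fresh (urls titles dates : List String) (t u dt : String)
    (hcont : urls.contains u = false) :
    pvStepA (urls, titles, dates) (t, u, dt) = (urls ++ [u], titles ++ [t], dates ++ [dt]) := by
  simp only [pvStepA]
  rw [hcont]
  simp

-- A's duplicate-url branch, stated on an explicit state
theorem pvStepA_dup (urls titles dates : List String) (t u dt : String) (i : Nat)
    (hcont : urls.contains u = true) (hi : PySem.List.index? urls u = some i) :
    pvStepA (urls, titles, dates) (t, u, dt) = (urls, pvBump titles i t, pvBump dates i dt) := by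
  simp only [pvStepA]
  rw [hcont, hi]
  simp

-- a url absent from the key column is not contained in the dict
theorem pvMk_contains_false (L : List (String × List String × List String)) (u : String)
    (hu : u ∉ L.map Prod.fst) : (PySem.Dict.mk L).contains u = false := by
  simp only [PySem.Dict.contains]
  rw [List.any_eq_false]
  intro p hp
  have : p.1 ≠ u := fun he => hu (he ▸ List.mem_map_of_mem hp)
  simpa using this

-- appending a fresh key keeps the key column duplicate-free
theorem pvAppend_nodup (L : List (String × List String × List String)) (u : String)
    (e : List String × List String)
    (hnd : (L.map Prod.fst).Nodup) (hu : u ∉ L.map Prod.fst) :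
    ((L ++ [(u, e)]).map Prod.fst).Nodup := by
  rw [List.map_append, List.nodup_append]
  refine ⟨hnd, by simp, ?_⟩
  intro x hx y hy
  have hyu : y = u := by simpa using hy
  subst hyu
  intro he; exact hu (he ▸ hx)

-- the duplicate-url step: overwriting the unique matching entry is pvBump at the url's first index
theorem pvReplace_step (L : List (String × List String × List String)) (u t dt : String)
    (hnd : (L.map Prod.fst).Nodup)
    (hne : ∀ p ∈ L, p.2.1 ≠ [] ∧ p.2.2 ≠ [])
    (hmem : u ∈ L.map Prod.fst) :
    ∃ i, PySem.List.index? (L.map Prod.fst) u = some i ∧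
      (L.map (fun p => if p.1 == u then (u, (((PySem.Dict.mk L).getD u ([], [])).1 ++ [t], ((PySem.Dict.mk L).getD u ([], [])).2 ++ [dt])) else p)).map (fun p => PySem.Str.join "\n" p.2.1)
        = pvBump (L.map (fun p => PySem.Str.join "\n" p.2.1)) i t ∧
      (L.map (fun p => if p.1 == u then (u, (((PySem.Dict.mk L).getD u ([], [])).1 ++ [t], ((PySem.Dict.mk L).getD u ([], [])).2 ++ [dt])) else p)).map (fun p => PySem.Str.join "\n" p.2.2)
        = pvBump (L.map (fun p => PySem.Str.join "\n" p.2.2)) i dt := by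
  induction L with
  | nil => simp at hmem
  | cons q L ih =>
    rw [List.map_cons] at hnd
    have hndt := (List.nodup_cons.mp hnd).2
    have hhd : q.1 ∉ L.map Prod.fst := (List.nodup_cons.mp hnd).1
    have hgdc := @PySem.Dict.get?_mk_cons String (List String × List String) _ q.1 q.2 L u
    by_cases hq : q.1 = u
    · have hnin : ∀ p ∈ L, p.1 ≠ u := by
        intro p hp he
        exact hhd (hq ▸ he ▸ List.mem_map_of_mem hp)
      have hgd : ((PySem.Dict.mk (q :: L)).getD u ([], [])) = q.2 := by
        simp [PySem.Dict.getD, hgdc, hq]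
      have hmapid : ∀ (f : (String × List String × List String) → (String × List String × List String)),
          (L.map (fun p => if p.1 == u then f p else p)) = L := by
        intro f
        have := List.map_congr_left (l := L)
          (f := fun p => if p.1 == u then f p else p) (g := id) (by intro p hp; simp [hnin p hp])
        simpa using this
      refine ⟨0, by simp [PySem.List.index?, List.idxOf?, hq, List.findIdx?_cons], ?_, ?_⟩
      · simp only [List.map_cons, hq, beq_self_eq_true, if_true, hgd, hmapid, pvBump]
        rw [pvJoin_append_singleton q.2.1 t (hne q (by simp)).1]
      · simp only [List.map_cons, hq, beq_self_eq_true, if_true, hgd, hmapid, pvBump]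
        rw [pvJoin_append_singleton q.2.2 dt (hne q (by simp)).2]
    · have hbq : (q.1 == u) = false := by simp [hq]
      have hgd : ((PySem.Dict.mk (q :: L)).getD u ([], [])) = ((PySem.Dict.mk L).getD u ([], [])) := by
        simp [PySem.Dict.getD, hbq, PySem.Dict.get?]
      have hmem' : u ∈ L.map Prod.fst := by
        rcases (by simpa using hmem : u = q.1 ∨ ∃ a b, (u, a, b) ∈ L) with h | h
        · exact absurd h.symm hq
        · obtain ⟨a, b, hab⟩ := h
          simpa using ⟨a, b, hab⟩
      obtain ⟨i, hi, h1, h2⟩ := ih hndt (fun p hp => hne p (by simp [hp])) hmem'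
      refine ⟨i + 1, ?_, ?_, ?_⟩
      · simp only [PySem.List.index?, List.idxOf?] at hi ⊢
        simp [List.findIdx?_cons, hbq, hi]
      · simp only [List.map_cons, hbq, pvBump, hgd]
        rw [if_neg (by simp)]
        exact congrArg _ h1
      · simp only [List.map_cons, hbq, pvBump, hgd]
        rw [if_neg (by simp)]
        exact congrArg _ h2

-- loop invariant: A's three lists are the key / joined-titles / joined-dates columns of B's dict
theorem pvLoop_eq (zs : List (String × String × String))
    (L : List (String × List String × List String))
    (hnd : (L.map Prod.fst).Nodup)
    (hne : ∀ p ∈ L, p.2.1 ≠ [] ∧ p.2.2 ≠ []) :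
    zs.foldl pvStepA (L.map Prod.fst, L.map (fun p => PySem.Str.join "\n" p.2.1), L.map (fun p => PySem.Str.join "\n" p.2.2))
      = ((zs.foldl pvStepB (PySem.Dict.mk L)).items.map Prod.fst,
         (zs.foldl pvStepB (PySem.Dict.mk L)).items.map (fun p => PySem.Str.join "\n" p.2.1),
         (zs.foldl pvStepB (PySem.Dict.mk L)).items.map (fun p => PySem.Str.join "\n" p.2.2)) := by
  induction zs generalizing L with
  | nil => simp
  | cons x zs ih =>
    obtain ⟨t, u, dt⟩ := x
    by_cases hu : u ∈ L.map Prod.fst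
    · -- duplicate url: overwrite in place on both sides
      have hcont : (L.map Prod.fst).contains u = true := by
        simpa [List.contains_iff_mem] using hu
      have hdcont : (PySem.Dict.mk L).contains u = true := by
        simpa [PySem.Dict.contains_iff_mem_keys, PySem.Dict.keys_mk] using hu
      obtain ⟨i, hi, h1, h2⟩ := pvReplace_step L u t dt hnd hne hu
      set v := ((PySem.Dict.mk L).getD u ([], [])) with hv
      have hB : pvStepB (PySem.Dict.mk L) (t, u, dt) =
          PySem.Dict.mk (L.map (fun p => if p.1 == u then (u, (v.1 ++ [t], v.2 ++ [dt])) else p)) := by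
        simp only [pvStepB, PySem.Dict.modify]
        rw [← hv]
        ext1
        rw [PySem.Dict.items_insert_of_contains _ _ hdcont]
      set L' := L.map (fun p => if p.1 == u then (u, (v.1 ++ [t], v.2 ++ [dt])) else p) with hL'
      have hkeys : L'.map Prod.fst = L.map Prod.fst := by
        rw [hL', List.map_map]
        apply List.map_congr_left
        intro p hp
        by_cases h : p.1 = u <;> simp [h]
      have hne' : ∀ p ∈ L', p.2.1 ≠ [] ∧ p.2.2 ≠ [] := by
        intro p hp
        rw [hL'] at hp
        obtain ⟨q, hq, hqe⟩ := List.mem_map.mp hp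
        by_cases h : q.1 = u
        · simp [h] at hqe; subst hqe; constructor <;> simp
        · simp [h] at hqe; subst hqe; exact hne q hq
      rw [List.foldl_cons, List.foldl_cons,
        pvStepA_dup _ _ _ _ _ _ i hcont hi, hB, ← hkeys, ← h1, ← h2]
      exact ih L' (by rw [hkeys]; exact hnd) hne'
    · -- fresh url: append on both sides
      have hcont : (L.map Prod.fst).contains u = false := by
        simpa [List.contains_iff_mem] using hu
      have hdcont : (PySem.Dict.mk L).contains u = false := pvMk_contains_false L u hu
      have hget : (PySem.Dict.mk L).get? u = none := by
        rw [PySem.Dict.get?_eq_none_iff_contains]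
        exact hdcont
      have hB : pvStepB (PySem.Dict.mk L) (t, u, dt) = PySem.Dict.mk (L ++ [(u, ([t], [dt]))]) := by
        simp only [pvStepB, PySem.Dict.modify, PySem.Dict.getD, hget]
        ext1
        rw [PySem.Dict.items_insert_of_not_contains _ _ hdcont]
        rfl
      have hA : pvStepA (L.map Prod.fst, L.map (fun p => PySem.Str.join "\n" p.2.1), L.map (fun p => PySem.Str.join "\n" p.2.2)) (t, u, dt)
          = ((L ++ [(u, ([t], [dt]))]).map Prod.fst,
             (L ++ [(u, ([t], [dt]))]).map (fun p => PySem.Str.join "\n" p.2.1),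
             (L ++ [(u, ([t], [dt]))]).map (fun p => PySem.Str.join "\n" p.2.2)) := by
        rw [pvStepA_fresh _ _ _ _ _ _ hcont]
        simp [pvJoin_singleton]
      rw [List.foldl_cons, List.foldl_cons, hA, hB]
      apply ih
      · exact pvAppend_nodup L u _ hnd hu
      · intro p hp
        rcases List.mem_append.mp hp with h | h
        · exact hne p h
        · simp at h; subst h; constructor <;> simp

-- ===== VERDICT (by name: the statement is the Claim_ definition above) =====
theorem combine_duplicate_urls_spec : Claim_equal_combine_duplicate_urls := by
  unfold Claim_equal_combine_duplicate_urls
  intro news_titles news_urls news_dates _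
  unfold Spec_combine_duplicate_urls combine_duplicate_urls combine_duplicate_urls_alt
  have h := pvLoop_eq (List.zip news_titles (List.zip news_urls news_dates)) [] (by simp) (by simp)
  simp only [List.map_nil] at h
  have hmk : (PySem.Dict.mk ([] : List (String × List String × List String))) = PySem.Dict.empty := rfl
  rw [hmk] at h
  set acc := (List.zip news_titles (List.zip news_urls news_dates)).foldl pvStepB PySem.Dict.empty with hacc
  have hnod : acc.keys.Nodup := by
    rw [hacc]
    exact PySem.Dict.nodup_keys_foldl_modify_key
      (List.zip news_titles (List.zip news_urls news_dates))
      (fun (x : String × String × String) => x.2.1) ([], [])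
      (fun (_ : PySem.Dict String (List String × List String)) (x : String × String × String)
        (p : List String × List String) => (p.1 ++ [x.1], p.2 ++ [x.2.2]))
      PySem.Dict.empty PySem.Dict.nodup_keys_empty
  have hitems := PySem.Dict.items_eq_map_keys acc hnod ([], [])
  rw [h]
  simp only [hitems, List.map_map]
  simp [Function.comp]
  rw [show (Prod.fst ∘ fun k => (k, acc.getD k ([], []))) = id from rfl, List.map_id]
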